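-- pv_equiv track=rewrite | github.com/humancipher/Programming_Contest | Programming_Contest/AtCoder/ABC/ABC_100-199/ABC_180-189/ABC_189/ABC_189_E.py | matrix_list
-- ===== SOURCE A (Python) =====
-- def product(A,B,n):
--     #行列A,B(n x n)に対するA x B
--     C = [[0 for _ in range(n)] for _ in range(n)]
--     for i in range(n):
--         for j in range(n):
--             for k in range(n):
--                 C[i][j] += A[i][k] * B[k][j]
--     return C
--
-- def matrix_list(OP,M):
--     Mat = [] #M[i]:i回目のクエリ後の行列
--     Mat.append([[1,0,0],[0,1,0],[0,0,1]])
--     for i in range(M):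
--         if OP[i][0] == 1:
--             Mat_op = [[0,1,0],[-1,0,0],[0,0,1]]
--             Mat.append(product(Mat_op,Mat[-1],3))
--         elif OP[i][0] == 2:
--             Mat_op = [[0,-1,0],[1,0,0],[0,0,1]]
--             Mat.append(product(Mat_op,Mat[-1],3))
--         elif OP[i][0] == 3:
--             Mat_op = [[-1,0,2 * OP[i][1]],[0,1,0],[0,0,1]]
--             Mat.append(product(Mat_op,Mat[-1],3))
--         elif OP[i][0] == 4:
--             Mat_op = [[1,0,0],[0,-1,2 * OP[i][1]],[0,0,1]]
--             Mat.append(product(Mat_op,Mat[-1],3))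
--     return Mat
-- ===== SOURCE B (Python) =====
-- def matrix_list(OP, M):
--     # Track where three probe points (0,0), (1,0), (0,1) land under the actual
--     # geometric operations (rotate +-90deg, reflect about x=k / y=k), and
--     # reconstruct each cumulative affine matrix from those three images:
--     # column c = image of origin, columns a,d / b,e = images of the unit
--     # vectors minus the origin's image.  No matrix composition is performed.
--     ox, oy = 0, 0   # image of (0, 0)
--     ux, uy = 1, 0   # image of (1, 0)
--     vx, vy = 0, 1   # image of (0, 1)
--     res = [[[1, 0, 0], [0, 1, 0], [0, 0, 1]]]
--     for i in range(M):
--         t = OP[i][0]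
--         if t == 1:      # clockwise 90: (x, y) -> (y, -x)
--             ox, oy, ux, uy, vx, vy = oy, -ox, uy, -ux, vy, -vx
--         elif t == 2:    # counter-clockwise 90: (x, y) -> (-y, x)
--             ox, oy, ux, uy, vx, vy = -oy, ox, -uy, ux, -vy, vx
--         elif t == 3:    # reflect about x = k: (x, y) -> (2k - x, y)
--             k = OP[i][1]
--             ox, ux, vx = 2 * k - ox, 2 * k - ux, 2 * k - vx
--         elif t == 4:    # reflect about y = k: (x, y) -> (x, 2k - y)
--             k = OP[i][1]
--             oy, uy, vy = 2 * k - oy, 2 * k - uy, 2 * k - vy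
--         else:
--             continue
--         res.append([[ux - ox, vx - ox, ox], [uy - oy, vy - oy, oy], [0, 0, 1]])
--     return res
-- ===== Notes on version B (the rewrite author's own statement) =====
-- stated objective: alternative
-- what changed: B performs no matrix composition at all: it pushes three probe points (0,0),(1,0),(0,1) through the actual geometric operations and reconstructs each cumulative affine matrix from the three point images, instead of left-multiplying a 3x3 operation matrix onto the running matrix with a generic triple loop.
import Mathlib
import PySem

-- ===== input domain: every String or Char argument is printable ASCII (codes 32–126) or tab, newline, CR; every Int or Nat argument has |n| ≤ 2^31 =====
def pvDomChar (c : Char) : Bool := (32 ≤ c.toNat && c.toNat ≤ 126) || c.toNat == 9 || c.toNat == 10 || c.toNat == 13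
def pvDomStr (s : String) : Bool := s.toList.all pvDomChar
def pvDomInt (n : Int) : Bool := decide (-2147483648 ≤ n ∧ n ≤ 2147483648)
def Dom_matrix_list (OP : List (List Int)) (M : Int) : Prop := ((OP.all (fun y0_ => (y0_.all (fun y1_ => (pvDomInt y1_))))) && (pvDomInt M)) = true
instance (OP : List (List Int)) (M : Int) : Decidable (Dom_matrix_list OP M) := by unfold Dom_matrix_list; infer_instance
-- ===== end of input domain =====

-- B composes nothing: it tracks the images of three probe points (0,0),(1,0),(0,1)
-- under the geometric operations and reconstructs each affine matrix from them.

-- ===== PORT A =====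
-- matrix element lookup A[i][k]; inside matrix_list all matrices are 3x3 so the
-- default 0/[] is never taken on inputs satisfying Pre_matrix_list.
def prodGet (A : List (List Int)) (i k : Nat) : Int := (A.getD i []).getD k 0

-- product(A,B,n): C starts at zeros and C[i][j] accumulates A[i][k]*B[k][j]
-- over k; the cells are independent, so the triple loop is exactly this
-- map/map/foldl over the same ranges.
def product (A B : List (List Int)) (n : Nat) : List (List Int) :=
  (List.range n).map (fun i => (List.range n).map (fun j =>
    (List.range n).foldl (fun acc k => acc + prodGet A i k * prodGet B k j) 0))

-- loop body of A: one iteration for index i (OP[i] lookups are in range under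
-- Pre_matrix_list; the .getD defaults are never taken there)
def stepA (OP : List (List Int)) (Mat : List (List (List Int))) (i : Int) :
    List (List (List Int)) :=
  let row := (PySem.List.pyGet? OP i).getD []
  if PySem.List.pyGet? row 0 = some 1 then
    Mat ++ [product [[0,1,0],[-1,0,0],[0,0,1]] (Mat.getLastD []) 3]
  else if PySem.List.pyGet? row 0 = some 2 then
    Mat ++ [product [[0,-1,0],[1,0,0],[0,0,1]] (Mat.getLastD []) 3]
  else if PySem.List.pyGet? row 0 = some 3 then
    Mat ++ [product [[-1,0,2 * (PySem.List.pyGet? row 1).getD 0],[0,1,0],[0,0,1]] (Mat.getLastD []) 3]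
  else if PySem.List.pyGet? row 0 = some 4 then
    Mat ++ [product [[1,0,0],[0,-1,2 * (PySem.List.pyGet? row 1).getD 0],[0,0,1]] (Mat.getLastD []) 3]
  else Mat

def matrix_list (OP : List (List Int)) (M : Int) : List (List (List Int)) :=
  (PySem.List.pyRange 0 M 1).foldl (stepA OP) [[[1,0,0],[0,1,0],[0,0,1]]]

-- ===== PORT B =====
-- loop body of B: state is (res, ox, oy, ux, uy, vx, vy), the images of the
-- three probe points; each branch moves the points and appends the matrix
-- reconstructed from them.
def stepB (OP : List (List Int))
    (s : List (List (List Int)) × Int × Int × Int × Int × Int × Int) (i : Int) :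
    List (List (List Int)) × Int × Int × Int × Int × Int × Int :=
  let (res, ox, oy, ux, uy, vx, vy) := s
  let row := (PySem.List.pyGet? OP i).getD []
  let t := PySem.List.pyGet? row 0
  if t = some 1 then
    let ox' := oy; let oy' := -ox; let ux' := uy; let uy' := -ux
    let vx' := vy; let vy' := -vx
    (res ++ [[[ux' - ox', vx' - ox', ox'], [uy' - oy', vy' - oy', oy'], [0,0,1]]],
     ox', oy', ux', uy', vx', vy')
  else if t = some 2 then
    let ox' := -oy; let oy' := ox; let ux' := -uy; let uy' := ux
    let vx' := -vy; let vy' := vx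
    (res ++ [[[ux' - ox', vx' - ox', ox'], [uy' - oy', vy' - oy', oy'], [0,0,1]]],
     ox', oy', ux', uy', vx', vy')
  else if t = some 3 then
    let k := (PySem.List.pyGet? row 1).getD 0
    let ox' := 2 * k - ox; let ux' := 2 * k - ux; let vx' := 2 * k - vx
    (res ++ [[[ux' - ox', vx' - ox', ox'], [uy - oy, vy - oy, oy], [0,0,1]]],
     ox', oy, ux', uy, vx', vy)
  else if t = some 4 then
    let k := (PySem.List.pyGet? row 1).getD 0
    let oy' := 2 * k - oy; let uy' := 2 * k - uy; let vy' := 2 * k - vy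
    (res ++ [[[ux - ox, vx - ox, ox], [uy' - oy', vy' - oy', oy'], [0,0,1]]],
     ox, oy', ux, uy', vx, vy')
  else (res, ox, oy, ux, uy, vx, vy)

def matrix_list_alt (OP : List (List Int)) (M : Int) : List (List (List Int)) :=
  ((PySem.List.pyRange 0 M 1).foldl (stepB OP)
    ([[[1,0,0],[0,1,0],[0,0,1]]], 0, 0, 1, 0, 0, 1)).1

-- ===== PRECONDITION & SPEC =====
-- Pre_ excludes exactly the inputs where Python A raises IndexError:
-- M exceeding len(OP), an empty query row, or op 3/4 with a missing parameter.
def Pre_matrix_list (OP : List (List Int)) (M : Int) : Prop :=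
  M ≤ (OP.length : Int) ∧
  ∀ i ∈ List.range M.toNat,
    (OP.getD i []) ≠ [] ∧
    (((OP.getD i []).headD 0 = 3 ∨ (OP.getD i []).headD 0 = 4) → 2 ≤ (OP.getD i []).length)
instance (OP : List (List Int)) (M : Int) : Decidable (Pre_matrix_list OP M) := by
  unfold Pre_matrix_list; infer_instance
def pvWitness_matrix_list : List (List Int) × Int := ([[1], [3, 5], [2], [4, -2]], 4)

def Spec_matrix_list (OP : List (List Int)) (M : Int) (out : List (List (List Int))) : Prop := out = matrix_list_alt OP M
instance (OP : List (List Int)) (M : Int) (out : List (List (List Int))) : Decidable (Spec_matrix_list OP M out) := by unfold Spec_matrix_list; infer_instance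

-- ===== CLAIM (what is proved, stated in full; the proofs are below) =====
def Claim_equal_matrix_list : Prop := ∀ (OP : List (List Int)) (M : Int), Dom_matrix_list OP M → Pre_matrix_list OP M → Spec_matrix_list OP M (matrix_list OP M)

-- ===== LEMMAS AND PROOFS =====

-- the affine matrix whose probe-point images are (ox,oy),(ux,uy),(vx,vy)
def ptMat (ox oy ux uy vx vy : Int) : List (List Int) :=
  [[ux - ox, vx - ox, ox], [uy - oy, vy - oy, oy], [0, 0, 1]]

lemma prod1 (ox oy ux uy vx vy : Int) :
    product [[0,1,0],[-1,0,0],[0,0,1]] (ptMat ox oy ux uy vx vy) 3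
      = ptMat oy (-ox) uy (-ux) vy (-vx) := by
  simp [product, prodGet, ptMat, List.range_succ]; omega

lemma prod2 (ox oy ux uy vx vy : Int) :
    product [[0,-1,0],[1,0,0],[0,0,1]] (ptMat ox oy ux uy vx vy) 3
      = ptMat (-oy) ox (-uy) ux (-vy) vx := by
  simp [product, prodGet, ptMat, List.range_succ]; omega

lemma prod3 (ox oy ux uy vx vy k : Int) :
    product [[-1,0,2*k],[0,1,0],[0,0,1]] (ptMat ox oy ux uy vx vy) 3
      = ptMat (2*k - ox) oy (2*k - ux) uy (2*k - vx) vy := by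
  simp [product, prodGet, ptMat, List.range_succ]; omega

lemma prod4 (ox oy ux uy vx vy k : Int) :
    product [[1,0,0],[0,-1,2*k],[0,0,1]] (ptMat ox oy ux uy vx vy) 3
      = ptMat ox (2*k - oy) ux (2*k - uy) vx (2*k - vy) := by
  simp [product, prodGet, ptMat, List.range_succ]; omega

lemma loop_eq (OP : List (List Int)) (L : List Int) (res : List (List (List Int)))
    (ox oy ux uy vx vy : Int) (h : res.getLast? = some (ptMat ox oy ux uy vx vy)) :
    L.foldl (stepA OP) res = (L.foldl (stepB OP) (res, ox, oy, ux, uy, vx, vy)).1 := by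
  induction L generalizing res ox oy ux uy vx vy with
  | nil => rfl
  | cons i L ih =>
    have hlast : res.getLastD [] = ptMat ox oy ux uy vx vy := by
      rw [List.getLastD_eq_getLast?, h]; rfl
    simp only [List.foldl_cons, stepA, stepB, hlast]
    split_ifs with h1 h2 h3 h4
    · rw [prod1]; exact ih _ _ _ _ _ _ _ (by simp [ptMat])
    · rw [prod2]; exact ih _ _ _ _ _ _ _ (by simp [ptMat])
    · rw [prod3]; exact ih _ _ _ _ _ _ _ (by simp [ptMat])
    · rw [prod4]; exact ih _ _ _ _ _ _ _ (by simp [ptMat])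
    · exact ih _ _ _ _ _ _ _ h

-- ===== VERDICT (by name: the statement is the Claim_ definition above) =====
theorem matrix_list_spec : Claim_equal_matrix_list := by
  intro OP M _ _
  unfold Spec_matrix_list matrix_list matrix_list_alt
  exact loop_eq OP _ _ 0 0 1 0 0 1 rfl
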